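-- pv_equiv track=rewrite | github.com/TejaswiA05V0/LeetCode-Daily-Practice | Matrix/are_similar_rows_shift.py | areSimilar
-- ===== SOURCE A (Python) =====
-- def areSimilar(mat, k):
--     m, n = len(mat), len(mat[0])
--     for i in range(m):
--         for j in range(n):
--             if i % 2 == 0:
--                 # even row: left shift by k
--                 if mat[i][j] != mat[i][(j + k) % n]:
--                     return False
--             else:
--                 # odd row: right shift by k
--                 if mat[i][j] != mat[i][(j - k) % n]:
--                     return False
--     return True
-- ===== SOURCE B (Python) =====
-- def areSimilar(mat, k):
--     n = len(mat[0])
--     if n == 0: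
--         return True
--     s = k % n
--     return all(row[:n] == row[s:n] + row[:s] for row in mat)
-- ===== Notes on version B (the rewrite author's own statement) =====
-- stated objective: simpler
-- what changed: A compares every element to the element k (or -k on odd rows) further under modular indexing in a nested index loop with a parity branch; B instead compares each row's first n entries once to their slice-built rotation row[s:n]+row[:s] with s = k % n, using that a row is invariant under a left shift by k iff under a right shift by k, so the parity branch and per-element modular arithmetic disappear.
-- outside the precondition, e.g. on areSimilar([[1, 2], [3]], 1): A returns False, B returns False
import Mathlib
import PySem

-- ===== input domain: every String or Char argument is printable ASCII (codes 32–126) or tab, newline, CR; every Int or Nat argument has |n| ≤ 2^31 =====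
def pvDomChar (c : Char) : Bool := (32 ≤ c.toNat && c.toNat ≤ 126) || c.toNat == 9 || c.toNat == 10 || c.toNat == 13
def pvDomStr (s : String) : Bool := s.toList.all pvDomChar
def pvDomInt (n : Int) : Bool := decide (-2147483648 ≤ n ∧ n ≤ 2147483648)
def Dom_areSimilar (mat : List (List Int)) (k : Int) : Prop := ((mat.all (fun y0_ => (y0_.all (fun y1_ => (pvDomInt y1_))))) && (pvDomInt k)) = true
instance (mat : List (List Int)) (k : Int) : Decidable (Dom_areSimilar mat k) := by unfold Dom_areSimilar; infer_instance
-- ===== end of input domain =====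

-- B replaces A's element-by-element modular-index comparison (with a parity branch) by comparing each
-- row to its single slice-built rotation row[s:]+row[:s], s = k % n; objective: simpler.

-- ===== PORT A =====
def areSimilar (mat : List (List Int)) (k : Int) : Bool :=
  let m : Int := mat.length
  let n : Int := ((PySem.List.pyGet? mat 0).getD []).length
  (PySem.List.pyRange 0 m 1).all fun i =>
    (PySem.List.pyRange 0 n 1).all fun j =>
      let row := (PySem.List.pyGet? mat i).getD []
      if PySem.Int.mod i 2 = 0 then
        decide ((PySem.List.pyGet? row j).getD 0 = (PySem.List.pyGet? row (PySem.Int.mod (j + k) n)).getD 0)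
      else
        decide ((PySem.List.pyGet? row j).getD 0 = (PySem.List.pyGet? row (PySem.Int.mod (j - k) n)).getD 0)

-- ===== PORT B =====
def areSimilar_alt (mat : List (List Int)) (k : Int) : Bool :=
  let n : Int := ((PySem.List.pyGet? mat 0).getD []).length
  if n = 0 then true
  else
    let s : Int := PySem.Int.mod k n
    mat.all fun row =>
      decide (PySem.List.slice row none (some n) =
        PySem.List.slice row (some s) (some n) ++ PySem.List.slice row none (some s))

-- ===== PRECONDITION & SPEC =====
-- Pre_ excludes the empty matrix (both Pythons raise IndexError on mat[0]) and matrices with a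
-- row shorter than the first row, a defensible corner on which A raises IndexError unless an
-- earlier mismatch already returned False, while B's slice-based test reads truncated rows.
def Pre_areSimilar (mat : List (List Int)) (k : Int) : Prop :=
  mat ≠ [] ∧ ∀ row ∈ mat, (mat.headD []).length ≤ row.length
instance (mat : List (List Int)) (k : Int) : Decidable (Pre_areSimilar mat k) := by
  unfold Pre_areSimilar; infer_instance
def pvWitness_areSimilar : List (List Int) × Int := ([[1, 2], [3, 4]], 1)

def Spec_areSimilar (mat : List (List Int)) (k : Int) (out : Bool) : Prop := out = areSimilar_alt mat k
instance (mat : List (List Int)) (k : Int) (out : Bool) : Decidable (Spec_areSimilar mat k out) := by unfold Spec_areSimilar; infer_instance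

-- ===== CLAIM (what is proved, stated in full; the proofs are below) =====
def Claim_equal_areSimilar : Prop := ∀ (mat : List (List Int)) (k : Int), Dom_areSimilar mat k → Pre_areSimilar mat k → Spec_areSimilar mat k (areSimilar mat k)

-- ===== LEMMAS AND PROOFS =====

lemma rot_getD (row : List Int) (sn j : Nat) (hs : sn ≤ row.length) (hj : j < row.length) :
    (row.drop sn ++ row.take sn).getD j 0 = row.getD ((j + sn) % row.length) 0 := by
  have hlen : (row.drop sn ++ row.take sn).length = row.length := by simp; omega
  have hmod : (j + sn) % row.length < row.length := Nat.mod_lt _ (by omega)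
  rw [List.getD_eq_getElem _ _ (by omega), List.getD_eq_getElem _ _ hmod]
  rcases lt_or_ge j (row.length - sn) with hlt | hge
  · rw [List.getElem_append_left (by simp; omega)]
    have h1 : (j + sn) % row.length = j + sn := Nat.mod_eq_of_lt (by omega)
    simp [List.getElem_drop, h1]
    congr 1; omega
  · rw [List.getElem_append_right (by simp; omega)]
    have h1 : (j + sn) % row.length = j + sn - row.length := by
      rw [Nat.mod_eq_sub_mod (by omega)]; exact Nat.mod_eq_of_lt (by omega)
    simp only [List.getElem_take, h1]
    congr 1; simp; omega

lemma rot_char (row : List Int) (sn : Nat) (hs : sn ≤ row.length) :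
    (row = row.drop sn ++ row.take sn) ↔
      (∀ j < row.length, row.getD j 0 = row.getD ((j + sn) % row.length) 0) := by
  have hlen : (row.drop sn ++ row.take sn).length = row.length := by simp; omega
  constructor
  · intro h j hj
    conv_lhs => rw [h]
    exact rot_getD row sn j hs hj
  · intro h
    apply List.ext_getElem (by omega)
    intro j hj hj2
    have hmod : (j + sn) % row.length < row.length := Nat.mod_lt _ (by omega)
    have this1 := h j hj
    rw [List.getD_eq_getElem _ _ hj, List.getD_eq_getElem _ _ hmod] at this1
    have hg := rot_getD row sn j hs hj
    rw [List.getD_eq_getElem _ _ hj2, List.getD_eq_getElem _ _ hmod] at hg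
    rw [this1, hg]

lemma cancel_mod (n j sn tn : Nat) (hj : j < n) (h : (sn + tn) % n = 0) :
    ((j + sn) % n + tn) % n = j := by
  rw [Nat.mod_add_mod, Nat.add_assoc, Nat.add_mod j (sn + tn), h, Nat.add_zero,
    Nat.mod_mod_of_dvd _ (dvd_refl n), Nat.mod_eq_of_lt hj]

lemma shift_dir (f : Nat → Int) (n sn tn : Nat) (hn : 0 < n) (h0 : (sn + tn) % n = 0)
    (h : ∀ j < n, f j = f ((j + tn) % n)) : ∀ j < n, f j = f ((j + sn) % n) := by
  intro j hj
  have h1 := h ((j + sn) % n) (Nat.mod_lt _ hn)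
  rw [cancel_mod n j sn tn hj h0] at h1
  exact h1.symm

lemma idx_bridge (n j : Nat) (hn : 0 < n) (t : Int) :
    PySem.Int.mod ((j : Int) + t) (n : Int) = (((j + (PySem.Int.mod t n).toNat) % n : Nat) : Int) := by
  have hn' : (0:Int) < (n:Int) := by exact_mod_cast hn
  rw [show PySem.Int.mod ((j:Int) + t) (n:Int) = ((j:Int) + t) % n from PySem.Int.mod_eq_emod_of_pos hn',
      show PySem.Int.mod t (n:Int) = t % n from PySem.Int.mod_eq_emod_of_pos hn']
  have h0 : (0:Int) ≤ t % n := Int.emod_nonneg t (by omega)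
  have ht : ((t % (n:Int)).toNat : Int) = t % n := Int.toNat_of_nonneg h0
  push_cast [ht]
  rw [Int.add_emod ((j:Int)) t, Int.add_emod ((j:Int)) (t % n), Int.emod_emod_of_dvd _ (dvd_refl _)]

-- one inner loop of A (a row, shift t), as a statement over Nat indices
lemma inner_char (row : List Int) (n0 : Nat) (hn : 0 < n0) (t : Int) :
    (∀ j ∈ PySem.List.pyRange 0 (n0:Int) 1, (decide ((PySem.List.pyGet? row j).getD 0 =
        (PySem.List.pyGet? row (PySem.Int.mod (j + t) (n0:Int))).getD 0)) = true)
    ↔ ∀ j < n0, row.getD j 0 = row.getD ((j + (PySem.Int.mod t (n0:Int)).toNat) % n0) 0 := by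
  rw [PySem.List.pyRange_one]
  simp only [sub_zero, Int.toNat_natCast, List.forall_mem_map, List.mem_range,
    zero_add, decide_eq_true_eq]
  constructor
  · intro h j hj
    have h1 := h j hj
    rw [idx_bridge n0 j hn t] at h1
    simp only [PySem.List.pyGet?_natCast] at h1
    simpa only [List.getD_eq_getElem?_getD] using h1
  · intro h j hj
    have h1 := h j hj
    rw [idx_bridge n0 j hn t]
    simp only [PySem.List.pyGet?_natCast]
    simpa only [List.getD_eq_getElem?_getD] using h1

-- per row: A's inner loop (for either parity's shift t) is true iff B's rotation test holds
lemma take_getD_iff (row : List Int) (n0 c : Nat) (hge : n0 ≤ row.length) (hn : 0 < n0) :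
    (∀ j < n0, row.getD j 0 = row.getD ((j + c) % n0) 0)
    ↔ (∀ j < n0, (row.take n0).getD j 0 = (row.take n0).getD ((j + c) % n0) 0) := by
  have hlen' : (row.take n0).length = n0 := by simp [hge]
  have hget : ∀ j, j < n0 → row.getD j 0 = (row.take n0).getD j 0 := by
    intro j hj
    rw [List.getD_eq_getElem _ _ (by omega), List.getD_eq_getElem _ _ (by omega)]
    simp [List.getElem_take]
  constructor <;> intro h j hj <;>
    have hm : (j + c) % n0 < n0 := Nat.mod_lt _ hn
  · rw [← hget j hj, ← hget _ hm]; exact h j hj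
  · rw [hget j hj, hget _ hm]; exact h j hj

lemma row_char (row : List Int) (n0 : Nat) (k : Int) (hge : n0 ≤ row.length) (hn : 0 < n0)
    (t : Int) (ht : t = k ∨ t = -k) :
    (∀ j ∈ PySem.List.pyRange 0 (n0:Int) 1, (decide ((PySem.List.pyGet? row j).getD 0 =
        (PySem.List.pyGet? row (PySem.Int.mod (j + t) (n0:Int))).getD 0)) = true)
    ↔ PySem.List.slice row none (some (n0:Int)) =
        PySem.List.slice row (some (PySem.Int.mod k (n0:Int))) (some (n0:Int)) ++
        PySem.List.slice row none (some (PySem.Int.mod k (n0:Int))) := by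
  have hn' : (0:Int) < (n0:Int) := by exact_mod_cast hn
  have hmodk : PySem.Int.mod k (n0:Int) = k % n0 := PySem.Int.mod_eq_emod_of_pos hn'
  have hk0 : (0:Int) ≤ PySem.Int.mod k (n0:Int) := by rw [hmodk]; exact Int.emod_nonneg k (by omega)
  set sn := (PySem.Int.mod k (n0:Int)).toNat with hsn
  set tn := (PySem.Int.mod (-k) (n0:Int)).toNat with htn
  have hsnlt : sn < n0 := by
    have := Int.emod_lt_of_pos k hn'
    omega
  have htnlt : tn < n0 := by
    have h1 : PySem.Int.mod (-k) (n0:Int) = (-k) % n0 := PySem.Int.mod_eq_emod_of_pos hn'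
    have := Int.emod_lt_of_pos (-k) hn'
    have := Int.emod_nonneg (-k) (show (n0:Int) ≠ 0 by omega)
    omega
  have h0 : (sn + tn) % n0 = 0 := by
    have h1 : PySem.Int.mod (-k) (n0:Int) = (-k) % n0 := PySem.Int.mod_eq_emod_of_pos hn'
    have hkn : ((sn:Int) + (tn:Int)) % (n0:Int) = 0 := by
      rw [hsn, htn, Int.toNat_of_nonneg hk0, Int.toNat_of_nonneg (by rw [h1]; exact Int.emod_nonneg _ (by omega)),
        hmodk, h1, ← Int.add_emod]
      simp
    have : (((sn + tn) % n0 : Nat) : Int) = 0 := by push_cast; exact hkn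
    exact_mod_cast this
  -- B's slices are drop/take of the first n0 entries
  have hlen' : (row.take n0).length = n0 := by simp [hge]
  have hn00 : (0:Int) ≤ (n0:Int) := by omega
  rw [PySem.List.slice_to row hn00, PySem.List.slice_to row hk0,
    PySem.List.slice_toNat row hk0 hn00, ← hsn]
  simp only [Int.toNat_natCast]
  have hshape : (row.take n0 = (row.take n0).drop sn ++ (row.take n0).take sn)
      ↔ (row.take n0 = (row.drop sn).take (n0 - sn) ++ row.take sn) := by
    rw [List.drop_take, List.take_take, Nat.min_def, if_pos (by omega)]
  rw [← hshape, rot_char (row.take n0) sn (by omega), hlen']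
  rw [show (∀ j < n0, (row.take n0).getD j 0 = (row.take n0).getD ((j + sn) % n0) 0)
      ↔ (∀ j < n0, row.getD j 0 = row.getD ((j + sn) % n0) 0)
    from (take_getD_iff row n0 sn hge hn).symm]
  rcases ht with rfl | rfl
  · exact inner_char row n0 hn t
  · rw [inner_char row n0 hn (-k), ← htn]
    constructor
    · intro h
      exact shift_dir (fun j => row.getD j 0) n0 sn tn hn h0 h
    · intro h
      exact shift_dir (fun j => row.getD j 0) n0 tn sn hn (by rwa [Nat.add_comm]) h

-- ===== VERDICT (by name: the statement is the Claim_ definition above) =====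
theorem areSimilar_spec : Claim_equal_areSimilar := by
  intro mat k _ hpre
  obtain ⟨hne, hrect⟩ := hpre
  unfold Spec_areSimilar areSimilar areSimilar_alt
  cases mat with
  | nil => exact absurd rfl hne
  | cons r0 rest =>
    simp only [PySem.List.pyGet?_zero_cons, Option.getD_some]
    have hrect' : ∀ row ∈ r0 :: rest, r0.length ≤ row.length := by
      intro row hrow; simpa using hrect row hrow
    by_cases hz : r0.length = 0
    · simp [hz, PySem.List.pyRange_one]
    · have hn : 0 < r0.length := Nat.pos_of_ne_zero hz
      rw [if_neg (by exact_mod_cast hz)]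
      rw [Bool.eq_iff_iff]
      rw [PySem.List.pyRange_one 0 ((r0 :: rest).length : Int)]
      simp only [sub_zero, Int.toNat_natCast, List.all_map, List.all_eq_true, List.mem_range,
        Function.comp, zero_add, decide_eq_true_eq]
      constructor
      · intro h row hrow
        obtain ⟨i, hi, rfl⟩ := List.mem_iff_getElem.mp hrow
        have h1 := h i hi
        have hrowget : (PySem.List.pyGet? (r0 :: rest) (i : Int)).getD [] = (r0 :: rest)[i] := by
          simp [PySem.List.pyGet?_natCast, List.getElem?_eq_getElem hi]
        rw [hrowget] at h1
        by_cases hpar : PySem.Int.mod (i : Int) 2 = 0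
        · simp only [if_pos hpar] at h1
          exact (row_char _ _ k (hrect' _ hrow) hn k (Or.inl rfl)).mp h1
        · simp only [if_neg hpar, sub_eq_add_neg] at h1
          exact (row_char _ _ k (hrect' _ hrow) hn (-k) (Or.inr rfl)).mp h1
      · intro h i hi
        have hrow : (r0 :: rest)[i] ∈ r0 :: rest := List.getElem_mem hi
        have hrowget : (PySem.List.pyGet? (r0 :: rest) (i : Int)).getD [] = (r0 :: rest)[i] := by
          simp [PySem.List.pyGet?_natCast, List.getElem?_eq_getElem hi]
        rw [hrowget]
        by_cases hpar : PySem.Int.mod (i : Int) 2 = 0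
        · simp only [if_pos hpar]
          exact (row_char _ _ k (hrect' _ hrow) hn k (Or.inl rfl)).mpr (h _ hrow)
        · simp only [if_neg hpar, sub_eq_add_neg]
          exact (row_char _ _ k (hrect' _ hrow) hn (-k) (Or.inr rfl)).mpr (h _ hrow)
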